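-- pv_equiv track=rewrite | github.com/Ed-Stout/Python-Portfolio | PoP project 1.py | ok_to_place_ship_at
-- ===== SOURCE A (Python) =====
-- def ok_to_place_ship_at(ship, fleet):
--   ship_type, ship_squares, ship_hits = ship
--   adj_squares = set()
--
--   for current_ship in fleet:
--     current_type, current_squares, current_hits = current_ship
--     for n, m in current_squares:
--       adj_squares.add((n,m))
--       adj_squares.add((n+1,m))
--       adj_squares.add((n-1,m))
--       adj_squares.add((n,m+1))
--       adj_squares.add((n,m-1))
--
--   for square in ship_squares:
--     #current_type, current_squares, current_hits = current_ship #checks if square already occupied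
--     if square in adj_squares:
--       return False
--
--   for n, m in ship_squares: #checks if same square as another ship
--     if n > 9 or n < 0 or m > 9 or m < 0:
--       return False
--
--   return True
-- ===== SOURCE B (Python) =====
-- def ok_to_place_ship_at(ship, fleet):
--     ship_type, ship_squares, ship_hits = ship
--     for x, y in ship_squares:
--         for current_ship in fleet:
--             for n, m in current_ship[1]:
--                 if abs(x - n) + abs(y - m) <= 1:
--                     return False
--     for n, m in ship_squares:
--         if not (0 <= n <= 9 and 0 <= m <= 9):
--             return False
--     return True
-- ===== Notes on version B (the rewrite author's own statement) =====
-- stated objective: simpler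
-- what changed: B drops the precomputed adjacency set entirely and instead compares each ship square directly against every fleet square with the Manhattan-distance test |x-n|+|y-m| <= 1.
import Mathlib
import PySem

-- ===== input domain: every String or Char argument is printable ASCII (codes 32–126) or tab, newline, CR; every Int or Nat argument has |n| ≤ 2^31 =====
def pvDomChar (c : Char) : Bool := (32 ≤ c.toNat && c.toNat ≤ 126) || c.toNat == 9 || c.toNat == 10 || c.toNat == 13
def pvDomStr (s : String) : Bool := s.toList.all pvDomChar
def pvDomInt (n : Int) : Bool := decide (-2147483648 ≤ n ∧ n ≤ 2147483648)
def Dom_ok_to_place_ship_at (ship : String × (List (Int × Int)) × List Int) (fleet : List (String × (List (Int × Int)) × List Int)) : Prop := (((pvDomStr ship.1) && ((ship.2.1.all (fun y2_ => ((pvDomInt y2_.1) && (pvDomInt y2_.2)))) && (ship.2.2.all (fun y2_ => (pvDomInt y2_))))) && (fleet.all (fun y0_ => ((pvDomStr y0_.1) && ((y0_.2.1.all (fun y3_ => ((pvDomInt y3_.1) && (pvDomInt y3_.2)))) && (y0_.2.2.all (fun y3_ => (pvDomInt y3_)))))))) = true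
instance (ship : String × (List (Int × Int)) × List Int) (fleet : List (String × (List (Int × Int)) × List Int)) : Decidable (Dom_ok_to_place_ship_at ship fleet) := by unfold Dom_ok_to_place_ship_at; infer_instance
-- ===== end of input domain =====

-- B drops the precomputed adjacency set and compares each ship square directly against
-- every fleet square with the Manhattan test |x-n|+|y-m| <= 1 (simpler, no extra data structure).

-- ===== PORT A =====
-- the inner loop body of A: add the square and its four orthogonal neighbours to the set
def pvAddAdj (s : PySem.Set (Int × Int)) (nm : Int × Int) : PySem.Set (Int × Int) :=
  ((((PySem.Set.add s (nm.1, nm.2)).add (nm.1 + 1, nm.2)).add (nm.1 - 1, nm.2)).add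
      (nm.1, nm.2 + 1)).add (nm.1, nm.2 - 1)

def ok_to_place_ship_at (ship : String × (List (Int × Int)) × List Int) (fleet : List (String × (List (Int × Int)) × List Int)) : Bool :=
  let ship_squares := ship.2.1
  let adj_squares : PySem.Set (Int × Int) :=
    fleet.foldl (fun s current_ship => current_ship.2.1.foldl pvAddAdj s) PySem.Set.empty
  if ship_squares.any (fun square => PySem.Set.contains adj_squares square) then false
  else if ship_squares.any (fun nm => nm.1 > 9 || nm.1 < 0 || nm.2 > 9 || nm.2 < 0) then false
  else true

-- ===== PORT B =====
def ok_to_place_ship_at_alt (ship : String × (List (Int × Int)) × List Int) (fleet : List (String × (List (Int × Int)) × List Int)) : Bool :=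
  if ship.2.1.any (fun xy =>
      fleet.any (fun current_ship =>
        current_ship.2.1.any (fun nm =>
          (xy.1 - nm.1).natAbs + (xy.2 - nm.2).natAbs ≤ 1))) then false
  else if ship.2.1.any (fun nm =>
      !(0 ≤ nm.1 && nm.1 ≤ 9 && 0 ≤ nm.2 && nm.2 ≤ 9)) then false
  else true

-- ===== PRECONDITION & SPEC =====
def Spec_ok_to_place_ship_at (ship : String × (List (Int × Int)) × List Int) (fleet : List (String × (List (Int × Int)) × List Int)) (out : Bool) : Prop := out = ok_to_place_ship_at_alt ship fleet
instance (ship : String × (List (Int × Int)) × List Int) (fleet : List (String × (List (Int × Int)) × List Int)) (out : Bool) : Decidable (Spec_ok_to_place_ship_at ship fleet out) := by unfold Spec_ok_to_place_ship_at; infer_instance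

-- ===== CLAIM (what is proved, stated in full; the proofs are below) =====
def Claim_equal_ok_to_place_ship_at : Prop := ∀ (ship : String × (List (Int × Int)) × List Int) (fleet : List (String × (List (Int × Int)) × List Int)), Dom_ok_to_place_ship_at ship fleet → Spec_ok_to_place_ship_at ship fleet (ok_to_place_ship_at ship fleet)

-- ===== LEMMAS AND PROOFS =====
lemma mem_foldl_pvAddAdj (squares : List (Int × Int)) (s : PySem.Set (Int × Int)) (p : Int × Int) :
    p ∈ squares.foldl pvAddAdj s ↔
      p ∈ s ∨ ∃ nm ∈ squares,
        p = (nm.1, nm.2) ∨ p = (nm.1 + 1, nm.2) ∨ p = (nm.1 - 1, nm.2) ∨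
        p = (nm.1, nm.2 + 1) ∨ p = (nm.1, nm.2 - 1) := by
  induction squares generalizing s with
  | nil => simp
  | cons q qs ih =>
    simp only [List.foldl_cons, ih, pvAddAdj, PySem.Set.mem_add, List.mem_cons]
    constructor
    · rintro ((((((h | h) | h) | h) | h) | h) | ⟨nm, hnm, h⟩)
      · exact Or.inl h
      · exact Or.inr ⟨q, Or.inl rfl, Or.inl h⟩
      · exact Or.inr ⟨q, Or.inl rfl, Or.inr (Or.inl h)⟩
      · exact Or.inr ⟨q, Or.inl rfl, Or.inr (Or.inr (Or.inl h))⟩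
      · exact Or.inr ⟨q, Or.inl rfl, Or.inr (Or.inr (Or.inr (Or.inl h)))⟩
      · exact Or.inr ⟨q, Or.inl rfl, Or.inr (Or.inr (Or.inr (Or.inr h)))⟩
      · exact Or.inr ⟨nm, Or.inr hnm, h⟩
    · rintro (h | ⟨nm, hnm | hnm, h | h | h | h | h⟩)
      · exact Or.inl (Or.inl (Or.inl (Or.inl (Or.inl (Or.inl h)))))
      all_goals first
        | (subst hnm; first
            | exact Or.inl (Or.inl (Or.inl (Or.inl (Or.inl (Or.inr h)))))
            | exact Or.inl (Or.inl (Or.inl (Or.inl (Or.inr h))))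
            | exact Or.inl (Or.inl (Or.inl (Or.inr h)))
            | exact Or.inl (Or.inl (Or.inr h))
            | exact Or.inl (Or.inr h))
        | exact Or.inr ⟨nm, hnm, Or.inl h⟩
        | exact Or.inr ⟨nm, hnm, Or.inr (Or.inl h)⟩
        | exact Or.inr ⟨nm, hnm, Or.inr (Or.inr (Or.inl h))⟩
        | exact Or.inr ⟨nm, hnm, Or.inr (Or.inr (Or.inr (Or.inl h)))⟩
        | exact Or.inr ⟨nm, hnm, Or.inr (Or.inr (Or.inr (Or.inr h)))⟩

lemma mem_adj_fold (fleet : List (String × (List (Int × Int)) × List Int)) (p : Int × Int) :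
    p ∈ fleet.foldl (fun s current_ship => current_ship.2.1.foldl pvAddAdj s) PySem.Set.empty ↔
      ∃ cs ∈ fleet, ∃ nm ∈ cs.2.1,
        p = (nm.1, nm.2) ∨ p = (nm.1 + 1, nm.2) ∨ p = (nm.1 - 1, nm.2) ∨
        p = (nm.1, nm.2 + 1) ∨ p = (nm.1, nm.2 - 1) := by
  suffices h : ∀ (s : PySem.Set (Int × Int)),
      p ∈ fleet.foldl (fun s current_ship => current_ship.2.1.foldl pvAddAdj s) s ↔
        p ∈ s ∨ ∃ cs ∈ fleet, ∃ nm ∈ cs.2.1,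
          p = (nm.1, nm.2) ∨ p = (nm.1 + 1, nm.2) ∨ p = (nm.1 - 1, nm.2) ∨
          p = (nm.1, nm.2 + 1) ∨ p = (nm.1, nm.2 - 1) by
    rw [h]; simp [PySem.Set.empty]
  intro s
  induction fleet generalizing s with
  | nil => simp
  | cons c cs ih =>
    simp only [List.foldl_cons, ih, mem_foldl_pvAddAdj, List.mem_cons]
    constructor
    · rintro ((h | h) | ⟨c', hc', h⟩)
      · exact Or.inl h
      · exact Or.inr ⟨c, Or.inl rfl, h⟩
      · exact Or.inr ⟨c', Or.inr hc', h⟩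
    · rintro (h | ⟨c', hc' | hc', h⟩)
      · exact Or.inl (Or.inl h)
      · subst hc'; exact Or.inl (Or.inr h)
      · exact Or.inr ⟨c', hc', h⟩

lemma neighbours_iff_manhattan (x y n m : Int) :
    ((x, y) = ((n, m) : Int × Int) ∨ (x, y) = ((n + 1, m) : Int × Int) ∨
     (x, y) = ((n - 1, m) : Int × Int) ∨ (x, y) = ((n, m + 1) : Int × Int) ∨
     (x, y) = ((n, m - 1) : Int × Int)) ↔ (x - n).natAbs + (y - m).natAbs ≤ 1 := by
  simp only [Prod.mk.injEq]
  omega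

-- ===== VERDICT (by name: the statement is the Claim_ definition above) =====
theorem ok_to_place_ship_at_spec : Claim_equal_ok_to_place_ship_at := by
  intro ship fleet _hDom
  unfold Spec_ok_to_place_ship_at ok_to_place_ship_at ok_to_place_ship_at_alt
  have h1 : (ship.2.1.any (fun square => PySem.Set.contains
        (fleet.foldl (fun s current_ship => current_ship.2.1.foldl pvAddAdj s) PySem.Set.empty) square)) =
      (ship.2.1.any (fun xy => fleet.any (fun current_ship =>
        current_ship.2.1.any (fun nm => (xy.1 - nm.1).natAbs + (xy.2 - nm.2).natAbs ≤ 1)))) := by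
    rw [Bool.eq_iff_iff]
    simp only [List.any_eq_true, PySem.Set.contains_iff, mem_adj_fold, decide_eq_true_eq]
    constructor
    · rintro ⟨sq, hsq, cs, hcs, nm, hnm, h⟩
      exact ⟨sq, hsq, cs, hcs, nm, hnm,
        (neighbours_iff_manhattan sq.1 sq.2 nm.1 nm.2).1 (by rwa [Prod.mk.eta] at h ⊢)⟩
    · rintro ⟨sq, hsq, cs, hcs, nm, hnm, h⟩
      refine ⟨sq, hsq, cs, hcs, nm, hnm, ?_⟩
      rw [← Prod.mk.eta (p := sq), ← Prod.mk.eta (p := nm)]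
      exact (neighbours_iff_manhattan sq.1 sq.2 nm.1 nm.2).2 h
  have h2 : (ship.2.1.any (fun nm => nm.1 > 9 || nm.1 < 0 || nm.2 > 9 || nm.2 < 0)) =
      (ship.2.1.any (fun nm => !(0 ≤ nm.1 && nm.1 ≤ 9 && 0 ≤ nm.2 && nm.2 ≤ 9))) := by
    have hf : (fun nm : Int × Int => decide (nm.1 > 9) || decide (nm.1 < 0) || decide (nm.2 > 9) || decide (nm.2 < 0)) =
        (fun nm : Int × Int => !(decide (0 ≤ nm.1) && decide (nm.1 ≤ 9) && decide (0 ≤ nm.2) && decide (nm.2 ≤ 9))) := by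
      funext nm
      rw [Bool.eq_iff_iff]
      simp only [Bool.or_eq_true, Bool.not_eq_true', Bool.and_eq_false_iff, decide_eq_true_eq,
        decide_eq_false_iff_not]
      omega
    simp only [hf]
  simp only [h1, h2]
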